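-- pv_equiv track=rewrite | github.com/AAON66/5xyj | backend/app/services/housing_fund_service.py | _compose_headers
-- ===== SOURCE A (Python) =====
-- from typing import Any, Optional
--
-- def _compose_headers(primary_headers: Optional[list[str]], secondary_headers: Optional[list[str]]) -> Optional[list[str]]:
--     composed: Optional[list[str]] = []
--     current_primary: Optional[str] = None
--     max_length = max(len(primary_headers), len(secondary_headers))
--
--     for index in range(max_length):
--         primary = primary_headers[index] if index < len(primary_headers) else None
--         secondary = secondary_headers[index] if index < len(secondary_headers) else None
--
--         if primary:
--             current_primary = primary
--
--         inherited_primary = current_primary if secondary else primary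
--         if inherited_primary and secondary:
--             composed.append(f"{inherited_primary} {secondary}")
--         else:
--             composed.append(secondary or inherited_primary)
--
--     return composed
-- ===== SOURCE B (Python) =====
-- def _compose_headers(primary_headers, secondary_headers):
--     max_length = max(len(primary_headers), len(secondary_headers))
--
--     # Pass 1: forward-fill the most recent truthy primary at or before each index.
--     carried = []
--     current = None
--     for index in range(max_length):
--         if index < len(primary_headers) and primary_headers[index]:
--             current = primary_headers[index]
--         carried.append(current)
--
--     # Pass 2: compose each slot from the raw values and the carried primary.
--     composed = []
--     for index in range(max_length):
--         primary = primary_headers[index] if index < len(primary_headers) else None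
--         secondary = secondary_headers[index] if index < len(secondary_headers) else None
--         if secondary and carried[index]:
--             composed.append(f"{carried[index]} {secondary}")
--         elif secondary:
--             composed.append(secondary)
--         else:
--             composed.append(primary)
--     return composed
-- ===== Notes on version B (the rewrite author's own statement) =====
-- stated objective: alternative
-- what changed: Replaces A's single stateful loop (mutable current_primary threaded through the composition logic) by two independent passes: first a forward-filled 'carried' table of the latest truthy primary, then a stateless per-index composition that reads raw primary, raw secondary and carried[i].
-- outside the precondition, e.g. on _compose_headers([], ['']): A returns [None], B returns [None]
import Mathlib
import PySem

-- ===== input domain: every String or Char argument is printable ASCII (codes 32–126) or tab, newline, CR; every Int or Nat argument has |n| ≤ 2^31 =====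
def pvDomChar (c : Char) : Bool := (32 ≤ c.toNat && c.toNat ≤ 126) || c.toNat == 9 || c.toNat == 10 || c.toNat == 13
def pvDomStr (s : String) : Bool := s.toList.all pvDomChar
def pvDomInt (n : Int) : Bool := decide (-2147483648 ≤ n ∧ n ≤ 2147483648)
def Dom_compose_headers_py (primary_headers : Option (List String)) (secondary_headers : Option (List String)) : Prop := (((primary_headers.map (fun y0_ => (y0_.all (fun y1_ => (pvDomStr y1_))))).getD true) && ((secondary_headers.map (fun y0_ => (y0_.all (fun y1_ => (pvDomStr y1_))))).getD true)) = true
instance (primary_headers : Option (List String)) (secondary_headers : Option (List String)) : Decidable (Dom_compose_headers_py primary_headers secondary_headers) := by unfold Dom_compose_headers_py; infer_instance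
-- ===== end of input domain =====

-- B recomputes the same composition in two independent passes (a forward-filled
-- 'carried' table of the latest truthy primary, then a stateless per-index
-- composition) instead of A's single loop threading mutable state: alternative
-- decomposition, same cost.


-- Python truthiness of an Optional[str]: None and "" are falsy.
def pyTruthyStr (o : Option String) : Bool :=
  match o with
  | some v => !(v == "")
  | none => false

-- Python's `x or y` on Optional[str] values.
def pyOrStr (a b : Option String) : Option String :=
  if pyTruthyStr a then a else b

-- ===== PORT A =====
-- Literal port of A's single loop: state = (composed, current_primary).
-- `.getD ""` on the appended value: under Pre_ the appended value is never
-- None (Python would append a non-str None there; those inputs are excluded).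
def compose_headers_py (primary_headers : Option (List String)) (secondary_headers : Option (List String)) : Option (List String) :=
  match primary_headers, secondary_headers with
  | some pl, some sl =>
    let maxLength := max pl.length sl.length
    let res := (List.range maxLength).foldl
      (fun (st : List String × Option String) index =>
        let primary := pl[index]?
        let secondary := sl[index]?
        let currentPrimary := if pyTruthyStr primary then primary else st.2
        let inheritedPrimary := if pyTruthyStr secondary then currentPrimary else primary
        if pyTruthyStr inheritedPrimary && pyTruthyStr secondary then
          (st.1 ++ [inheritedPrimary.getD "" ++ " " ++ secondary.getD ""], currentPrimary)
        else
          (st.1 ++ [(pyOrStr secondary inheritedPrimary).getD ""], currentPrimary))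
      ([], none)
    some res.1
  | _, _ => none  -- Python raises TypeError on len(None); excluded by Pre_

-- ===== PORT B =====
-- Pass 1: forward-filled table of the latest truthy primary; pass 2: stateless
-- per-index composition.  `.getD ""` as in port A (None appends excluded by Pre_).
def compose_headers_py_alt (primary_headers : Option (List String)) (secondary_headers : Option (List String)) : Option (List String) :=
  match primary_headers with
  | none => none  -- Python raises TypeError on len(None); excluded by Pre_
  | some pl =>
  match secondary_headers with
  | none => none
  | some sl =>
    let maxLength := max pl.length sl.length
    let carried := ((List.range maxLength).foldl
      (fun (st : List (Option String) × Option String) index =>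
        let current := if pyTruthyStr pl[index]? then pl[index]? else st.2
        (st.1 ++ [current], current))
      ([], none)).1
    some ((List.range maxLength).map (fun index =>
      let primary := pl[index]?
      let secondary := sl[index]?
      let c := carried.getD index none
      if pyTruthyStr secondary && pyTruthyStr c then
        c.getD "" ++ " " ++ secondary.getD ""
      else if pyTruthyStr secondary then
        secondary.getD ""
      else
        primary.getD ""))

-- ===== PRECONDITION & SPEC =====
-- Pre_ excludes (a) None arguments, on which A raises TypeError, and (b) inputs
-- with an empty-string secondary at an index beyond the primary list, on which
-- A returns a list containing None — not a value of the declared list[str] type.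
def Pre_compose_headers_py (primary_headers : Option (List String)) (secondary_headers : Option (List String)) : Prop :=
  primary_headers.isSome = true ∧ secondary_headers.isSome = true ∧
    ∀ x ∈ List.drop (primary_headers.getD []).length (secondary_headers.getD []), x ≠ ""

instance (primary_headers : Option (List String)) (secondary_headers : Option (List String)) : Decidable (Pre_compose_headers_py primary_headers secondary_headers) := by unfold Pre_compose_headers_py; infer_instance

def pvWitness_compose_headers_py : Option (List String) × Option (List String) := (some ["a", "", "b"], some ["x", "y"])

def Spec_compose_headers_py (primary_headers : Option (List String)) (secondary_headers : Option (List String)) (out : Option (List String)) : Prop := out = compose_headers_py_alt primary_headers secondary_headers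
instance (primary_headers : Option (List String)) (secondary_headers : Option (List String)) (out : Option (List String)) : Decidable (Spec_compose_headers_py primary_headers secondary_headers out) := by unfold Spec_compose_headers_py; infer_instance

-- ===== CLAIM (what is proved, stated in full; the proofs are below) =====
def Claim_equal_compose_headers_py : Prop := ∀ (primary_headers : Option (List String)) (secondary_headers : Option (List String)), Dom_compose_headers_py primary_headers secondary_headers → Pre_compose_headers_py primary_headers secondary_headers → Spec_compose_headers_py primary_headers secondary_headers (compose_headers_py primary_headers secondary_headers)

-- ===== LEMMAS AND PROOFS =====

-- The forward-filled primary after scanning the first n indices.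
def curAfter (pl : List String) (n : Nat) : Option String :=
  (List.range n).foldl (fun c i => if pyTruthyStr pl[i]? then pl[i]? else c) none

-- What both programs emit at index i (phrased as B emits it).
def outAt (pl sl : List String) (i : Nat) : String :=
  if pyTruthyStr sl[i]? && pyTruthyStr (curAfter pl (i + 1)) then
    (curAfter pl (i + 1)).getD "" ++ " " ++ (sl[i]?).getD ""
  else if pyTruthyStr sl[i]? then
    (sl[i]?).getD ""
  else
    (pl[i]?).getD ""

theorem bFold_spec (pl : List String) (n : Nat) :
    (List.range n).foldl
      (fun (st : List (Option String) × Option String) index =>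
        let current := if pyTruthyStr pl[index]? then pl[index]? else st.2
        (st.1 ++ [current], current))
      ([], none)
    = ((List.range n).map (fun i => curAfter pl (i + 1)), curAfter pl n) := by
  induction n with
  | zero => simp [curAfter]
  | succ n ih =>
    rw [List.range_succ, List.foldl_append, ih]
    simp [curAfter, List.range_succ]

theorem aFold_spec (pl sl : List String) (n : Nat) :
    (List.range n).foldl
      (fun (st : List String × Option String) index =>
        let primary := pl[index]?
        let secondary := sl[index]?
        let currentPrimary := if pyTruthyStr primary then primary else st.2
        let inheritedPrimary := if pyTruthyStr secondary then currentPrimary else primary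
        if pyTruthyStr inheritedPrimary && pyTruthyStr secondary then
          (st.1 ++ [inheritedPrimary.getD "" ++ " " ++ secondary.getD ""], currentPrimary)
        else
          (st.1 ++ [(pyOrStr secondary inheritedPrimary).getD ""], currentPrimary))
      ([], none)
    = ((List.range n).map (outAt pl sl), curAfter pl n) := by
  induction n with
  | zero => simp [curAfter]
  | succ n ih =>
    rw [List.range_succ, List.foldl_append, ih]
    have hc : (if pyTruthyStr pl[n]? then pl[n]? else curAfter pl n) = curAfter pl (n + 1) := by
      simp [curAfter, List.range_succ]
    simp only [List.foldl_cons, List.foldl_nil, List.map_append, List.map_cons, List.map_nil]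
    rw [hc]
    by_cases hs : pyTruthyStr sl[n]? = true
    · by_cases hcur : pyTruthyStr (curAfter pl (n + 1)) = true
      · simp [outAt, hs, hcur]
      · simp only [Bool.not_eq_true] at hcur
        simp [outAt, hs, hcur, pyOrStr]
    · simp only [Bool.not_eq_true] at hs
      have hpo : pyOrStr sl[n]? pl[n]? = pl[n]? := by simp [pyOrStr, hs]
      simp [outAt, hs, pyOrStr]

theorem carried_getD (pl : List String) (m i : Nat) (h : i < m) :
    ((List.range m).map (fun j => curAfter pl (j + 1))).getD i none = curAfter pl (i + 1) := by
  rw [List.getD_eq_getElem?_getD]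
  simp [h]

-- ===== VERDICT (by name: the statement is the Claim_ definition above) =====
theorem compose_headers_py_spec : Claim_equal_compose_headers_py := by
  intro ph sh _ hpre
  unfold Spec_compose_headers_py
  match ph, sh with
  | some pl, some sl =>
    unfold compose_headers_py compose_headers_py_alt
    simp only
    rw [aFold_spec, bFold_spec]
    congr 1
    apply List.map_congr_left
    intro i hi
    have him : i < max pl.length sl.length := List.mem_range.mp hi
    rw [carried_getD pl _ i him]
    rfl
  | none, _ => exact absurd hpre (by simp [Pre_compose_headers_py])
  | some _, none => exact absurd hpre (by simp [Pre_compose_headers_py])
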